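-- pv_equiv track=rewrite | github.com/Programmers-Study-2024/algorithm-study | week16/p42584_python_yeogeun.py | solution
-- ===== SOURCE A (Python) =====
-- def solution(prices):
--     answer = [0]*len(prices)
--     stack = [] # 인덱스
--
--     # 주식 가격 떨어진 기간 구하기
--     for idx,price in enumerate(prices):
--         while stack and prices[stack[-1]] > price:
--             j = stack.pop()
--             answer[j] = idx-j
--         stack.append(idx)
--
--     while stack:
--         j = stack.pop()
--         answer[j] = len(prices)-1-j
--     return answer
-- ===== SOURCE B (Python) =====
-- def solution(prices):
--     n = len(prices)
--     answer = [0] * n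
--     for i in range(n):
--         ans = n - 1 - i
--         for j in range(i + 1, n):
--             if prices[j] < prices[i]:
--                 ans = j - i
--                 break
--         answer[i] = ans
--     return answer
-- ===== Notes on version B (the rewrite author's own statement) =====
-- stated objective: simpler
-- what changed: A maintains a monotonic stack of pending indices and back-fills answers when a lower price arrives; B drops the stack entirely and, for each index, does a plain forward scan for the first strictly lower later price (n-1-i when none).
import Mathlib
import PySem

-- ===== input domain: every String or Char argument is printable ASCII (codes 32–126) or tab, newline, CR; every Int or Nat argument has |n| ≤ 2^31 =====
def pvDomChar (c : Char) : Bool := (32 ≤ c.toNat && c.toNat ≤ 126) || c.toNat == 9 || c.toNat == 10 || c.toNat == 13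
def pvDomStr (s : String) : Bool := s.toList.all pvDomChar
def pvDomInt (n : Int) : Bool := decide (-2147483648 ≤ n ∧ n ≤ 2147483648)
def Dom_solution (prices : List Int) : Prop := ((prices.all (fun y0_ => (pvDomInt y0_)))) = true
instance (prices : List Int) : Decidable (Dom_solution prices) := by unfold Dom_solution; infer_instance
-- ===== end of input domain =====

-- B replaces A's monotonic index stack by plain nested forward scans: simpler, no stack state (O(n^2) vs A's O(n)).

-- ===== PORT A =====
-- the inner `while stack and prices[stack[-1]] > price:` loop; the stack is a
-- List Int with the Python stack's TOP as head (stack[-1] = head, pop = tail,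
-- append = cons).  Stack entries are always valid indices, so pyGetD/pySetD are
-- exact for `prices[stack[-1]]` and `answer[j] = idx-j`.
def popLoopA (prices : List Int) (idx : Int) (price : Int) :
    List Int → List Int → List Int × List Int
  | [], answer => ([], answer)
  | j :: rest, answer =>
    if PySem.List.pyGetD prices j 0 > price then
      popLoopA prices idx price rest (PySem.List.pySetD answer j (idx - j))
    else (j :: rest, answer)

-- one iteration of `for idx,price in enumerate(prices):` (pop then append idx)
def stepA (prices : List Int) (st : List Int × List Int) (ip : Int × Int) :
    List Int × List Int :=
  let r := popLoopA prices ip.1 ip.2 st.1 st.2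
  (ip.1 :: r.1, r.2)

def solution (prices : List Int) : List Int :=
  let n := prices.length
  let st := (PySem.List.enumerate prices).foldl (stepA prices)
      ([], List.replicate n (0 : Int))
  -- final `while stack:` loop, popping from the top (head)
  st.1.foldl (fun a j => PySem.List.pySetD a j ((n : Int) - 1 - j)) st.2

-- ===== PORT B =====
-- inner `for j in range(i+1, n): if prices[j] < prices[i]: ans = j-i; break`
-- as a recursion over the remaining suffix, carrying the running index j
def findDrop (p : Int) (j : Nat) : List Int → Option Nat
  | [] => none
  | q :: rest => if q < p then some j else findDrop p (j + 1) rest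

def solution_alt (prices : List Int) : List Int :=
  let n := prices.length
  (List.range n).map (fun i =>
    match findDrop (prices.getD i 0) (i + 1) (prices.drop (i + 1)) with
    | some j => (j : Int) - (i : Int)
    | none => (n : Int) - 1 - (i : Int))

-- ===== PRECONDITION & SPEC =====
def Spec_solution (prices : List Int) (out : List Int) : Prop := out = solution_alt prices
instance (prices : List Int) (out : List Int) : Decidable (Spec_solution prices out) := by unfold Spec_solution; infer_instance

-- ===== CLAIM (what is proved, stated in full; the proofs are below) =====
def Claim_equal_solution : Prop := ∀ (prices : List Int), Dom_solution prices → Spec_solution prices (solution prices)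

-- ===== LEMMAS AND PROOFS =====

-- an index i already finished at prefix bound k: answer[i] holds the first-drop value
def DoneAt (prices : List Int) (a : List Int) (i k : Nat) : Prop :=
  ∃ m : Nat, i < m ∧ m < k ∧ prices.getD m 0 < prices.getD i 0 ∧
    (∀ t : Nat, i < t → t < m → prices.getD i 0 ≤ prices.getD t 0) ∧
    a.getD i 0 = (m : Int) - (i : Int)

-- the loop invariant of A's main loop, after processing indices < k
def LoopInv (prices : List Int) (k : Nat) (s : List Int) (a : List Int) : Prop :=
  a.length = prices.length ∧
  s.Pairwise (· > ·) ∧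
  (∀ j : Int, j ∈ s ↔ 0 ≤ j ∧ j < (k : Int) ∧
      ∀ m : Nat, j < (m : Int) → m < k → prices.getD j.toNat 0 ≤ prices.getD m 0) ∧
  (∀ i : Nat, i < k → (i : Int) ∉ s → DoneAt prices a i k)

lemma findDrop_eq_none (p : Int) (l : List Int) :
    ∀ j : Nat, (∀ k : Nat, k < l.length → ¬ l.getD k 0 < p) → findDrop p j l = none := by
  induction l with
  | nil => intro j _; rfl
  | cons q rest ih =>
    intro j h
    have h0 : ¬ q < p := by simpa using h 0 (by simp)
    simp only [findDrop, if_neg h0]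
    exact ih (j + 1) (fun k hk => by simpa using h (k + 1) (by simpa using hk))

lemma findDrop_eq_some (p : Int) (l : List Int) :
    ∀ (j m : Nat), j ≤ m → m - j < l.length → l.getD (m - j) 0 < p →
      (∀ k : Nat, k < m - j → ¬ l.getD k 0 < p) → findDrop p j l = some m := by
  induction l with
  | nil => intro j m _ h2 _ _; simp at h2
  | cons q rest ih =>
    intro j m h1 h2 h3 h4
    by_cases hq : q < p
    · have hj : m = j := by
        by_contra hne
        exact h4 0 (by omega) (by simpa using hq)
      simp [findDrop, hq, hj]
    · have hne : m ≠ j := by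
        intro he; subst he; simp at h3; exact hq h3
      simp only [findDrop, if_neg hq]
      refine ih (j + 1) m (by omega) ?_ ?_ ?_
      · simp at h2; omega
      · have : m - j = (m - (j + 1)) + 1 := by omega
        rw [this] at h3; simpa using h3
      · intro k hk
        have := h4 (k + 1) (by omega)
        simpa using this

lemma getD_drop (l : List Int) (d k : Nat) (h : d + k < l.length) :
    (l.drop d).getD k 0 = l.getD (d + k) 0 := by
  rw [List.getD_eq_getElem _ _ (by simp; omega), List.getD_eq_getElem _ _ h]
  simp

-- B's entry at i when no later price is strictly lower
lemma findDrop_none_of_forall (prices : List Int) (i : Nat) (_ : i < prices.length)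
    (h : ∀ m : Nat, i < m → m < prices.length → prices.getD i 0 ≤ prices.getD m 0) :
    findDrop (prices.getD i 0) (i + 1) (prices.drop (i + 1)) = none := by
  apply findDrop_eq_none
  intro k hk
  rw [getD_drop _ _ _ (by simp at hk; omega)]
  simp at hk
  exact not_lt.2 (h (i + 1 + k) (by omega) (by omega))

-- B's entry at i when m is the first strictly-lower later index
lemma findDrop_some_of (prices : List Int) (i m : Nat) (him : i < m) (hm : m < prices.length)
    (hlt : prices.getD m 0 < prices.getD i 0)
    (hbetween : ∀ t : Nat, i < t → t < m → prices.getD i 0 ≤ prices.getD t 0) :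
    findDrop (prices.getD i 0) (i + 1) (prices.drop (i + 1)) = some m := by
  apply findDrop_eq_some _ _ _ _ (by omega)
  · simp; omega
  · rw [getD_drop _ _ _ (by omega)]
    have : i + 1 + (m - (i + 1)) = m := by omega
    rw [this]; exact hlt
  · intro k hk
    rw [getD_drop _ _ _ (by omega)]
    exact not_lt.2 (hbetween (i + 1 + k) (by omega) (by omega))

-- spec of the inner pop loop at step k
lemma popLoopA_spec (prices : List Int) (k : Nat) (hk : k < prices.length) :
    ∀ (s a : List Int),
      s.Pairwise (· > ·) →
      (∀ j : Int, j ∈ s → 0 ≤ j ∧ j < (k : Int) ∧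
          ∀ m : Nat, j < (m : Int) → m < k → prices.getD j.toNat 0 ≤ prices.getD m 0) →
      a.length = prices.length →
      (∀ i : Nat, i < k → (i : Int) ∉ s → DoneAt prices a i (k + 1)) →
      (popLoopA prices (k : Int) (prices.getD k 0) s a).2.length = prices.length ∧
      (popLoopA prices (k : Int) (prices.getD k 0) s a).1.Pairwise (· > ·) ∧
      (∀ j : Int, j ∈ (popLoopA prices (k : Int) (prices.getD k 0) s a).1 ↔
          j ∈ s ∧ prices.getD j.toNat 0 ≤ prices.getD k 0) ∧
      (∀ i : Nat, i < k + 1 → i ≠ k → (i : Int) ∉ (popLoopA prices (k : Int) (prices.getD k 0) s a).1 →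
          DoneAt prices (popLoopA prices (k : Int) (prices.getD k 0) s a).2 i (k + 1)) := by
  intro s
  induction s with
  | nil =>
    intro a _ _ hlen hdone
    refine ⟨hlen, by simp [popLoopA], by simp [popLoopA], ?_⟩
    intro i hik hne hmem
    exact hdone i (by omega) (by simp)
  | cons j rest ih =>
    intro a hpw hb hlen hdone
    obtain ⟨hj0, hjk, hjmono⟩ := hb j (by simp)
    have hjn : (j.toNat : Int) = j := Int.toNat_of_nonneg hj0
    have hjnk : j.toNat < k := by omega
    have hget : PySem.List.pyGetD prices j 0 = prices.getD j.toNat 0 :=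
      PySem.List.pyGetD_of_nonneg prices 0 hj0
    by_cases hc : prices.getD j.toNat 0 > prices.getD k 0
    · -- pop j, set answer[j] = k - j, recurse
      have hstep : popLoopA prices (k : Int) (prices.getD k 0) (j :: rest) a =
          popLoopA prices (k : Int) (prices.getD k 0) rest
            (a.set j.toNat ((k : Int) - j)) := by
        simp only [popLoopA, hget, if_pos hc, PySem.List.pySetD_of_nonneg a _ hj0]
      have hdone' : ∀ i : Nat, i < k → (i : Int) ∉ rest →
          DoneAt prices (a.set j.toNat ((k : Int) - j)) i (k + 1) := by
        intro i hik hmem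
        by_cases hij : i = j.toNat
        · subst hij
          refine ⟨k, hjnk, by omega, hc, ?_, ?_⟩
          · intro t h1 h2
            exact hjmono t (by omega) h2
          · rw [hjn]
            have hjlen : j.toNat < a.length := by omega
            simp [List.getD, hjlen]
        · have hins : (i : Int) ∉ (j :: rest) := by
            simp only [List.mem_cons, not_or]
            exact ⟨by omega, hmem⟩
          obtain ⟨m, h1, h2, h3, h4, h5⟩ := hdone i hik hins
          refine ⟨m, h1, h2, h3, h4, ?_⟩
          rw [← h5]
          simp [List.getD, Ne.symm hij]
      have hres := ih (a.set j.toNat ((k : Int) - j)) (hpw.of_cons)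
        (fun j' hj' => hb j' (by simp [hj'])) (by simpa using hlen) hdone'
      rw [hstep]
      refine ⟨hres.1, hres.2.1, ?_, hres.2.2.2⟩
      intro j'
      rw [hres.2.2.1 j']
      constructor
      · rintro ⟨hm, hle⟩; exact ⟨by simp [hm], hle⟩
      · rintro ⟨hm, hle⟩
        rcases List.mem_cons.1 hm with he | hm'
        · subst he; omega
        · exact ⟨hm', hle⟩
    · -- top of stack not larger: the loop stops, nothing changes
      have hstep : popLoopA prices (k : Int) (prices.getD k 0) (j :: rest) a = (j :: rest, a) := by
        simp only [popLoopA, hget, if_neg hc]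
      rw [hstep]
      refine ⟨hlen, hpw, ?_, ?_⟩
      · intro j'
        constructor
        · intro hm
          refine ⟨hm, ?_⟩
          rcases List.mem_cons.1 hm with he | hm'
          · subst he; omega
          · obtain ⟨h0', hk', hmono'⟩ := hb j' (by simp [hm'])
            have hlt : j' < j := (List.pairwise_cons.1 hpw).1 j' hm'
            have := hmono' j.toNat (by omega) hjnk
            omega
        · exact fun h => h.1
      · intro i hik hne hmem
        exact hdone i (by omega) hmem

-- the invariant is preserved through one iteration of the main loop
lemma stepA_inv (prices : List Int) (k : Nat) (hk : k < prices.length) (s a : List Int)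
    (h : LoopInv prices k s a) :
    LoopInv prices (k + 1) (stepA prices (s, a) ((k : Int), prices.getD k 0)).1
      (stepA prices (s, a) ((k : Int), prices.getD k 0)).2 := by
  obtain ⟨hlen, hpw, hmem, hdone⟩ := h
  have hb : ∀ j : Int, j ∈ s → 0 ≤ j ∧ j < (k : Int) ∧
      ∀ m : Nat, j < (m : Int) → m < k → prices.getD j.toNat 0 ≤ prices.getD m 0 :=
    fun j hj => (hmem j).1 hj
  have hdone' : ∀ i : Nat, i < k → (i : Int) ∉ s → DoneAt prices a i (k + 1) := by
    intro i h1 h2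
    obtain ⟨m, g1, g2, g3, g4, g5⟩ := hdone i h1 h2
    exact ⟨m, g1, by omega, g3, g4, g5⟩
  obtain ⟨c1, c2, c3, c4⟩ := popLoopA_spec prices k hk s a hpw hb hlen hdone'
  refine ⟨c1, ?_, ?_, ?_⟩
  · refine List.pairwise_cons.2 ⟨?_, c2⟩
    intro j hj
    have := (hb j ((c3 j).1 hj).1).2.1
    omega
  · intro j
    simp only [stepA, List.mem_cons]
    constructor
    · rintro (he | hj)
      · subst he
        refine ⟨by omega, by omega, ?_⟩
        intro m h1 h2
        omega
      · obtain ⟨hjs, hle⟩ := (c3 j).1 hj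
        obtain ⟨g0, g1, g2⟩ := hb j hjs
        refine ⟨g0, by omega, ?_⟩
        intro m h1 h2
        by_cases hm : m = k
        · subst hm; exact hle
        · exact g2 m h1 (by omega)
    · rintro ⟨g0, g1, g2⟩
      by_cases he : j = (k : Int)
      · exact Or.inl he
      · refine Or.inr ((c3 j).2 ⟨?_, ?_⟩)
        · exact (hmem j).2 ⟨g0, by omega, fun m h1 h2 => g2 m h1 (by omega)⟩
        · have := g2 k (by omega) (by omega)
          exact this
  · intro i h1 h2
    simp only [stepA, List.mem_cons, not_or] at h2
    have hik : i ≠ k := by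
      intro he; exact h2.1 (by rw [he])
    exact c4 i h1 hik h2.2

-- folding the enumerated suffix carries the invariant to the end
lemma fold_inv (prices : List Int) :
    ∀ (l : List Int) (k : Nat), prices.drop k = l → ∀ (s a : List Int), LoopInv prices k s a →
      LoopInv prices (k + l.length)
        (((PySem.List.enumerate l (k : Int)).foldl (stepA prices) (s, a)).1)
        (((PySem.List.enumerate l (k : Int)).foldl (stepA prices) (s, a)).2) := by
  intro l
  induction l with
  | nil =>
    intro k _ s a h
    simpa [PySem.List.enumerate] using h
  | cons x xs ih =>
    intro k hdrop s a h
    have hk : k < prices.length := by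
      have := congrArg List.length hdrop
      simp at this
      omega
    have hx : prices.getD k 0 = x := by
      have h0 : (prices.drop k).getD 0 0 = x := by rw [hdrop]; rfl
      rw [getD_drop prices k 0 (by omega)] at h0
      simpa using h0
    have hdrop' : prices.drop (k + 1) = xs := by
      have : (prices.drop k).drop 1 = prices.drop (k + 1) := by
        rw [List.drop_drop]
      rw [← this, hdrop]
      rfl
    have hcons : PySem.List.enumerate (x :: xs) (k : Int) =
        ((k : Int), x) :: PySem.List.enumerate xs ((k + 1 : Nat) : Int) := by
      rw [PySem.List.enumerate_cons]
      push_cast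
      rfl
    rw [hcons]
    simp only [List.foldl_cons]
    have hstep := stepA_inv prices k hk s a h
    rw [← hx]
    have := ih (k + 1) hdrop'
      (stepA prices (s, a) ((k : Int), prices.getD k 0)).1
      (stepA prices (s, a) ((k : Int), prices.getD k 0)).2 hstep
    simp only [Prod.mk.eta] at this
    have harith : k + 1 + xs.length = k + (xs.length + 1) := by omega
    rw [harith] at this
    simpa using this

-- effect of the final while loop
lemma final_fold (n : Nat) :
    ∀ (s : List Int) (a : List Int), s.Pairwise (· > ·) →
      (∀ j : Int, j ∈ s → 0 ≤ j ∧ j < (a.length : Int)) →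
      (s.foldl (fun a j => PySem.List.pySetD a j ((n : Int) - 1 - j)) a).length = a.length ∧
      (∀ i : Nat, i < a.length →
        (s.foldl (fun a j => PySem.List.pySetD a j ((n : Int) - 1 - j)) a).getD i 0 =
          if (i : Int) ∈ s then (n : Int) - 1 - (i : Int) else a.getD i 0) := by
  intro s
  induction s with
  | nil => intro a _ _; simp
  | cons j rest ih =>
    intro a hpw hb
    obtain ⟨hj0, hjlen⟩ := hb j (by simp)
    have hjn : (j.toNat : Int) = j := Int.toNat_of_nonneg hj0
    have hjnat : j.toNat < a.length := by omega
    simp only [List.foldl_cons, PySem.List.pySetD_of_nonneg a _ hj0]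
    set a1 := a.set j.toNat ((n : Int) - 1 - j) with ha1
    have hlen1 : a1.length = a.length := by simp [ha1]
    have hres := ih a1 hpw.of_cons (fun j' hj' => by
      rw [hlen1]; exact hb j' (by simp [hj']))
    rw [hlen1] at hres
    refine ⟨hres.1, ?_⟩
    intro i hi
    rw [hres.2 i hi]
    by_cases hm : (i : Int) ∈ rest
    · simp [hm]
    · simp only [hm, if_false, List.mem_cons]
      by_cases he : (i : Int) = j
      · have hij : i = j.toNat := by omega
        subst hij
        simp [he, ha1, List.getD, hjnat]
      · have hij : i ≠ j.toNat := by omega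
        simp only [he, or_false, if_false]
        simp [ha1, List.getD, Ne.symm hij]

-- ===== VERDICT (by name: the statement is the Claim_ definition above) =====
theorem solution_spec : Claim_equal_solution := by
  intro prices _
  unfold Spec_solution
  set n := prices.length with hn
  set st := (PySem.List.enumerate prices (0 : Int)).foldl (stepA prices)
      ([], List.replicate n (0 : Int)) with hst
  have hinit : LoopInv prices 0 [] (List.replicate n (0 : Int)) := by
    refine ⟨by simp [hn], by simp, ?_, ?_⟩
    · intro j
      simp only [List.not_mem_nil, false_iff, not_and]
      intro h1 h2
      omega
    · intro i hi
      omega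
  have hinv := fold_inv prices prices 0 rfl [] (List.replicate n (0 : Int)) hinit
  simp only [Nat.cast_zero, Nat.zero_add] at hinv
  rw [← hst, ← hn] at hinv
  obtain ⟨hlen, hpw, hmem, hdone⟩ := hinv
  have hbnd : ∀ j : Int, j ∈ st.1 → 0 ≤ j ∧ j < (st.2.length : Int) := by
    intro j hj
    obtain ⟨g0, g1, _⟩ := (hmem j).1 hj
    rw [hlen]
    exact ⟨g0, g1⟩
  obtain ⟨flen, fval⟩ := final_fold n st.1 st.2 hpw hbnd
  have hsol : solution prices =
      st.1.foldl (fun a j => PySem.List.pySetD a j ((n : Int) - 1 - j)) st.2 := by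
    rfl
  have hslen : (solution prices).length = n := by rw [hsol, flen, hlen]
  have halen : (solution_alt prices).length = n := by simp [solution_alt, ← hn]
  apply List.ext_getElem (by rw [hslen, halen])
  intro i hi1 hi2
  have hi : i < n := by rwa [hslen] at hi1
  have hilen : i < st.2.length := by omega
  have hgetD : (solution prices).getD i 0 = (solution prices)[i] :=
    List.getD_eq_getElem _ _ hi1
  have haltv : (solution_alt prices)[i] =
      (match findDrop (prices.getD i 0) (i + 1) (prices.drop (i + 1)) with
        | some j => (j : Int) - (i : Int)
        | none => (n : Int) - 1 - (i : Int)) := by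
    simp [solution_alt, ← hn]
  rw [← hgetD, haltv, hsol, fval i hilen]
  by_cases hc : (i : Int) ∈ st.1
  · obtain ⟨_, _, g2⟩ := (hmem _).1 hc
    simp only [Int.toNat_natCast] at g2
    rw [findDrop_none_of_forall prices i hi (fun m h1 h2 => g2 m (by omega) h2)]
    simp [hc]
  · obtain ⟨m, g1, g2, g3, g4, g5⟩ := hdone i hi hc
    rw [findDrop_some_of prices i m g1 g2 g3 g4, if_neg hc]
    exact g5
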